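-- pv_equiv track=rewrite | github.com/sueszli/vector-database-benchmark | dataset/python-mutated/exonerate_text.py | _get_inter_coords
-- ===== SOURCE A (Python) =====
-- from itertools import chain
--
-- def _get_inter_coords(coords, strand=1):
--     if False:
--         while True:
--             i = 10
--     'Return list of pairs covering intervening ranges (PRIVATE).\n\n    From the given pairs of coordinates, returns a list of pairs\n    covering the intervening ranges.\n    '
--     if strand == -1:
--         sorted_coords = [(max(a, b), min(a, b)) for (a, b) in coords]
--         inter_coords = list(chain(*sorted_coords))[1:-1]
--         return list(zip(inter_coords[1::2], inter_coords[::2]))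
--     else:
--         inter_coords = list(chain(*coords))[1:-1]
--         return list(zip(inter_coords[::2], inter_coords[1::2]))
-- ===== SOURCE B (Python) =====
-- def _get_inter_coords(coords, strand=1):
--     cs = list(coords)
--     pairs = list(zip(cs, cs[1:]))
--     if strand == -1:
--         return [(max(nxt), min(cur)) for cur, nxt in pairs]
--     else:
--         return [(cur[1], nxt[0]) for cur, nxt in pairs]
-- ===== Notes on version B (the rewrite author's own statement) =====
-- stated objective: simpler
-- what changed: Replaced A's flatten-via-chain, strip the two end elements, two stride-2 slices and zip pipeline with a single direct pass over consecutive coordinate pairs (zip of the list with its tail), building each intervening range from the two adjacent pairs.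
import Mathlib
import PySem

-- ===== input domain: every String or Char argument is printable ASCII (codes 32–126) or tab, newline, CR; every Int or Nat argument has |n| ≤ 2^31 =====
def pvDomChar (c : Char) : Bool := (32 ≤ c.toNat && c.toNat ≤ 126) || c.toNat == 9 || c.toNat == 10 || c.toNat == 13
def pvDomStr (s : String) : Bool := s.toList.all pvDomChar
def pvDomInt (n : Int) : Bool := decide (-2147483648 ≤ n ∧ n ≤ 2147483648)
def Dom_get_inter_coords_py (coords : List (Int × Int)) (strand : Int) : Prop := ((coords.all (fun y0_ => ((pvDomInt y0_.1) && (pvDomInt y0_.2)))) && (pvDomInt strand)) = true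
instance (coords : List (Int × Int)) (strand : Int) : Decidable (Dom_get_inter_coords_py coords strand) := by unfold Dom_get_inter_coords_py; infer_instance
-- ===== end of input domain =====

-- B replaces A's flatten / strip-ends / stride-slice / zip pipeline by one direct pass over
-- consecutive coordinate pairs (objective: simpler; same O(n) cost).

-- ===== PORT A =====
-- chain(*coords) = flatMap; xs[1:-1] = slice (some 1) (some (-1)); xs[::2] / xs[1::2] =
-- slice? … 2 (the step 2 ≠ 0, so slice? is always `some`; `.getD []` is exact there).
def get_inter_coords_py (coords : List (Int × Int)) (strand : Int) : List (Int × Int) :=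
  if strand == -1 then
    let sorted_coords := coords.map (fun ab => (max ab.1 ab.2, min ab.1 ab.2))
    let inter_coords := PySem.List.slice (sorted_coords.flatMap (fun p => [p.1, p.2])) (some 1) (some (-1))
    List.zip ((PySem.List.slice? inter_coords (some 1) none 2).getD []) ((PySem.List.slice? inter_coords none none 2).getD [])
  else
    let inter_coords := PySem.List.slice (coords.flatMap (fun p => [p.1, p.2])) (some 1) (some (-1))
    List.zip ((PySem.List.slice? inter_coords none none 2).getD []) ((PySem.List.slice? inter_coords (some 1) none 2).getD [])

-- ===== PORT B =====
-- cs[1:] = tail; zip of the list with its tail pairs each coordinate with its successor.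
def get_inter_coords_py_alt (coords : List (Int × Int)) (strand : Int) : List (Int × Int) :=
  let pairs := List.zip coords coords.tail
  if strand == -1 then
    pairs.map (fun cn => (max cn.2.1 cn.2.2, min cn.1.1 cn.1.2))
  else
    pairs.map (fun cn => (cn.1.2, cn.2.1))

-- ===== PRECONDITION & SPEC =====
def Spec_get_inter_coords_py (coords : List (Int × Int)) (strand : Int) (out : List (Int × Int)) : Prop := out = get_inter_coords_py_alt coords strand
instance (coords : List (Int × Int)) (strand : Int) (out : List (Int × Int)) : Decidable (Spec_get_inter_coords_py coords strand out) := by unfold Spec_get_inter_coords_py; infer_instance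

-- ===== CLAIM (what is proved, stated in full; the proofs are below) =====
def Claim_equal_get_inter_coords_py : Prop := ∀ (coords : List (Int × Int)) (strand : Int), Dom_get_inter_coords_py coords strand → Spec_get_inter_coords_py coords strand (get_inter_coords_py coords strand)

-- ===== LEMMAS AND PROOFS =====

-- xs[::2] as a structural function: every other element starting at index 0.
def pvEvens {α : Type} : List α → List α
  | [] => []
  | [x] => [x]
  | x :: _ :: zs => x :: pvEvens zs

theorem pvEvens_cons {α : Type} (a : α) (l : List α) :
    pvEvens (a :: l) = a :: pvEvens l.tail := by
  cases l <;> rfl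

-- the common index form of both stride-2 slices
theorem pvCore {α : Type} (xs : List α) :
    List.filterMap (fun k => xs[2 * k]?) (List.range ((xs.length + 1) / 2)) = pvEvens xs := by
  induction xs using pvEvens.induct with
  | case1 => simp [pvEvens]
  | case2 x => simp [pvEvens, List.range_succ]
  | case3 x y zs ih =>
    have hcnt : ((x :: y :: zs).length + 1) / 2 = (zs.length + 1) / 2 + 1 := by
      simp; omega
    rw [hcnt, List.range_succ_eq_map, List.filterMap_cons, List.filterMap_map]
    have hfun : ((fun k => (x :: y :: zs)[2 * k]?) ∘ Nat.succ) = (fun k => zs[2 * k]?) := by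
      funext k
      have h2 : 2 * Nat.succ k = (2 * k + 1) + 1 := by omega
      simp [h2]
    simp only [pvEvens, hfun, ih, Nat.mul_zero, List.getElem?_cons_zero]

-- xs[::2] is pvEvens xs
theorem pvStride0 {α : Type} (xs : List α) :
    PySem.List.slice? xs none none 2 = some (pvEvens xs) := by
  rw [← pvCore]
  simp only [PySem.List.slice?, PySem.List.sliceIndices]
  rw [if_neg (by norm_num : ¬(2:Int) = 0)]
  have h2n : ¬ (2:Int) < 0 := by norm_num
  have h02 : (0:Int) < 2 := by norm_num
  simp only [if_neg h2n, if_pos h02]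
  have hf : (fun x : Nat => xs[(0 + 2 * (x:Int)).toNat]?) = (fun k : Nat => xs[2 * k]?) := by
    funext k; congr 1; omega
  have hc : (if (0:Int) < (xs.length:Int) then (((xs.length:Int) - 0 + 2 - 1) / 2).toNat else 0) = (xs.length + 1) / 2 := by
    split_ifs with h <;> omega
  rw [hf, hc]

-- xs[1::2] is pvEvens xs.tail
theorem pvStride1 {α : Type} (xs : List α) :
    PySem.List.slice? xs (some 1) none 2 = some (pvEvens xs.tail) := by
  cases xs with
  | nil => rfl
  | cons x rest =>
    rw [← pvCore]
    simp only [PySem.List.slice?, PySem.List.sliceIndices]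
    rw [if_neg (by norm_num : ¬(2:Int) = 0)]
    have h2n : ¬ (2:Int) < 0 := by norm_num
    have h02 : (0:Int) < 2 := by norm_num
    have h1n : ¬ (1:Int) < 0 := by norm_num
    simp only [if_neg h2n, if_pos h02, if_neg h1n]
    simp only [List.length_cons, List.tail_cons]
    push_cast
    have hmin : min (1:Int) ((rest.length:Int) + 1) = 1 := by omega
    rw [hmin]
    have hf : (fun k : Nat => (x :: rest)[((1:Int) + 2 * (k:Int)).toNat]?) = (fun k : Nat => rest[2 * k]?) := by
      funext k
      have h : ((1:Int) + 2 * (k:Int)).toNat = 2 * k + 1 := by omega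
      rw [h, List.getElem?_cons_succ]
    have hc : (if (1:Int) < (rest.length:Int) + 1 then (((rest.length:Int) + 1 - 1 + 2 - 1) / 2).toNat else 0) = (rest.length + 1) / 2 := by
      split_ifs with h <;> omega
    rw [hf, hc]

-- xs[1:-1] strips the first and last elements
theorem pvSlice11 {α : Type} (xs : List α) :
    PySem.List.slice xs (some 1) (some (-1)) = xs.tail.dropLast := by
  simp only [PySem.List.slice, PySem.List.clampIdx]
  cases xs with
  | nil => rfl
  | cons x rest =>
    simp only [List.length_cons, List.tail_cons]
    have hn1 : ((-1:Int) < 0) = True := by simp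
    have h10 : ((1:Int) < 0) = False := by simp
    simp only [hn1, h10, if_true, if_false]
    have ha : min (Int.toNat 1) (rest.length + 1) = 1 := by omega
    have hb : (if ((rest.length + 1 : Nat) : Int) + -1 < 0 then 0 else (((rest.length + 1 : Nat) : Int) + -1).toNat) = rest.length := by
      split_ifs with h <;> omega
    rw [ha, hb]
    simp [List.dropLast_eq_take]

-- structural recursion over consecutive pairs, default-strand branch
theorem pvMainA : ∀ cs : List (Int × Int),
    List.zip (pvEvens ((cs.flatMap fun p => [p.1, p.2]).tail.dropLast))
             (pvEvens ((cs.flatMap fun p => [p.1, p.2]).tail.dropLast).tail)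
    = (List.zip cs cs.tail).map (fun cn => (cn.1.2, cn.2.1))
  | [] => rfl
  | [p] => rfl
  | p :: q :: rest => by
    have hI : ((p :: q :: rest).flatMap fun p => [p.1, p.2]).tail.dropLast
        = p.2 :: q.1 :: ((q :: rest).flatMap fun p => [p.1, p.2]).tail.dropLast := by
      simp [List.flatMap_cons]
    rw [hI, pvEvens_cons, List.tail_cons, List.tail_cons, pvEvens_cons, List.tail_cons,
        List.zip_cons_cons, pvMainA (q :: rest)]
    rfl

-- structural recursion over consecutive pairs, strand == -1 branch
theorem pvMainB : ∀ cs : List (Int × Int),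
    List.zip (pvEvens (((cs.map (fun ab => (max ab.1 ab.2, min ab.1 ab.2))).flatMap fun p => [p.1, p.2]).tail.dropLast).tail)
             (pvEvens (((cs.map (fun ab => (max ab.1 ab.2, min ab.1 ab.2))).flatMap fun p => [p.1, p.2]).tail.dropLast))
    = (List.zip cs cs.tail).map (fun cn => (max cn.2.1 cn.2.2, min cn.1.1 cn.1.2))
  | [] => rfl
  | [p] => rfl
  | p :: q :: rest => by
    have hI : (((p :: q :: rest).map (fun ab => (max ab.1 ab.2, min ab.1 ab.2))).flatMap fun p => [p.1, p.2]).tail.dropLast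
        = min p.1 p.2 :: max q.1 q.2 :: (((q :: rest).map (fun ab => (max ab.1 ab.2, min ab.1 ab.2))).flatMap fun p => [p.1, p.2]).tail.dropLast := by
      simp [List.map_cons, List.flatMap_cons]
    rw [hI, List.tail_cons, pvEvens_cons, List.tail_cons, pvEvens_cons, List.tail_cons,
        List.zip_cons_cons, pvMainB (q :: rest)]
    rfl

-- ===== VERDICT (by name: the statement is the Claim_ definition above) =====
theorem get_inter_coords_py_spec : Claim_equal_get_inter_coords_py := by
  intro coords strand _
  unfold Spec_get_inter_coords_py get_inter_coords_py get_inter_coords_py_alt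
  by_cases h : strand == -1
  · simp only [h, if_pos]
    rw [pvSlice11, pvStride0, pvStride1]
    simpa using pvMainB coords
  · simp only [h, Bool.false_eq_true, if_false]
    rw [pvSlice11, pvStride0, pvStride1]
    simpa using pvMainA coords
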